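-- pv_equiv track=rewrite | github.com/CelestialPaler/NexusPlatform | nexus-platform/backend/rtp_analysis/core.py | _count_reordering
-- ===== SOURCE A (Python) =====
-- def _count_reordering(unwrapped_seq):
--     max_seen = -1
--     reorder_events = 0
--     for seq in unwrapped_seq:
--         if seq < max_seen:
--             reorder_events += 1
--         else:
--             max_seen = seq
--     return reorder_events
-- ===== SOURCE B (Python) =====
-- def _count_reordering(unwrapped_seq):
--     seq = list(unwrapped_seq)
--
--     def solve(lo, hi, m):
--         """(reorder-event count, updated running max) for seq[lo:hi] entered with max m."""
--         if hi - lo == 0: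
--             return 0, m
--         if hi - lo == 1:
--             x = seq[lo]
--             if x < m:
--                 return 1, m
--             return 0, x
--         mid = (lo + hi) // 2
--         c1, m1 = solve(lo, mid, m)
--         c2, m2 = solve(mid, hi, m1)
--         return c1 + c2, m2
--
--     return solve(0, len(seq), -1)[0]
-- ===== Notes on version B (the rewrite author's own statement) =====
-- stated objective: alternative
-- what changed: Replaced the linear stateful loop by a divide-and-conquer recursion that splits the list in half, computes (reorder count, updated running max) for the left half, threads that max into the right half and combines the pair results.
import Mathlib
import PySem

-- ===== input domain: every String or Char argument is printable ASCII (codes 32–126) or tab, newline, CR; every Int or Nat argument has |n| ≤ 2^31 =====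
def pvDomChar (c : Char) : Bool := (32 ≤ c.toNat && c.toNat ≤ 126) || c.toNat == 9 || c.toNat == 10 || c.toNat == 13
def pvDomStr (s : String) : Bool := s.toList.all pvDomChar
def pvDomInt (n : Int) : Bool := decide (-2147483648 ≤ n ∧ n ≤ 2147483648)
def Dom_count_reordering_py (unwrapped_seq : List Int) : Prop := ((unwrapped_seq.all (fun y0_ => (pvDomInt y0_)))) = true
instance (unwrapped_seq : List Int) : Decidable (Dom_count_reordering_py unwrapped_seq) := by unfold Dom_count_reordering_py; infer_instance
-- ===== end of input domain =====

-- B replaces A's single stateful loop by a divide-and-conquer recursion over index halves (alternative decomposition; same O(n) cost).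
-- ===== PORT A =====
-- A: running max_seen (sentinel -1) and a counter in one loop; state is (max_seen, reorder_events).
def pvALoop : List Int → Int × Int → Int × Int
  | [], s => s
  | x :: xs, (m, c) => if x < m then pvALoop xs (m, c + 1) else pvALoop xs (x, c)

def count_reordering_py (unwrapped_seq : List Int) : Int :=
  (pvALoop unwrapped_seq (-1, 0)).2

-- ===== PORT B =====
-- B: solve(lo, hi, m) returns (reorder count, updated running max) for seq[lo:hi]; halves combined by
-- threading the left half's max into the right half. The extra fuel argument (≥ hi - lo at every call)
-- only makes the recursion structural; it changes no computed value. seq[lo] is only read with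
-- lo < len (hi ≤ len, hi - lo = 1), where Python's indexing returns the element; ported as getD
-- with an unreachable default.
def pvSolve (seq : List Int) : Nat → Nat → Nat → Int → Int × Int
  | 0, _, _, m => (0, m)
  | fuel + 1, lo, hi, m =>
    if hi - lo = 0 then (0, m)
    else if hi - lo = 1 then
      let x := seq.getD lo 0
      if x < m then (1, m) else (0, x)
    else
      let mid := (lo + hi) / 2
      let p1 := pvSolve seq fuel lo mid m
      let p2 := pvSolve seq fuel mid hi p1.2
      (p1.1 + p2.1, p2.2)

def count_reordering_py_alt (unwrapped_seq : List Int) : Int :=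
  (pvSolve unwrapped_seq unwrapped_seq.length 0 unwrapped_seq.length (-1)).1

-- ===== PRECONDITION & SPEC =====
def Spec_count_reordering_py (unwrapped_seq : List Int) (out : Int) : Prop := out = count_reordering_py_alt unwrapped_seq
instance (unwrapped_seq : List Int) (out : Int) : Decidable (Spec_count_reordering_py unwrapped_seq out) := by unfold Spec_count_reordering_py; infer_instance

-- ===== CLAIM (what is proved, stated in full; the proofs are below) =====
def Claim_equal_count_reordering_py : Prop := ∀ (unwrapped_seq : List Int), Dom_count_reordering_py unwrapped_seq → Spec_count_reordering_py unwrapped_seq (count_reordering_py unwrapped_seq)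

-- ===== LEMMAS AND PROOFS =====
theorem pvALoop_append (l r : List Int) : ∀ s, pvALoop (l ++ r) s = pvALoop r (pvALoop l s) := by
  induction l with
  | nil => intro s; simp [pvALoop]
  | cons x xs ih =>
    intro ⟨m, c⟩
    by_cases h : x < m <;> simp [pvALoop, h, ih]

theorem pvALoop_shift (xs : List Int) : ∀ (s : Int × Int),
    pvALoop xs s = ((pvALoop xs (s.1, 0)).1, s.2 + (pvALoop xs (s.1, 0)).2) := by
  induction xs with
  | nil => intro s; simp [pvALoop]
  | cons x xs ih =>
    intro ⟨m, c⟩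
    by_cases h : x < m
    · simp only [pvALoop, if_pos h]
      rw [ih (m, c + 1), ih (m, 0 + 1)]
      simp only [Prod.mk.injEq]
      exact ⟨by trivial, by omega⟩
    · simp only [pvALoop, if_neg h]
      exact ih (x, c)

-- pvSolve on seq[lo:hi] computes exactly A's loop over that segment (count, final max).
theorem pvSolve_spec (seq : List Int) : ∀ fuel lo hi m, hi - lo ≤ fuel → hi ≤ seq.length →
    pvSolve seq fuel lo hi m =
      ((pvALoop ((seq.drop lo).take (hi - lo)) (m, 0)).2,
       (pvALoop ((seq.drop lo).take (hi - lo)) (m, 0)).1) := by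
  intro fuel
  induction fuel with
  | zero =>
    intro lo hi m hn _
    have h0 : hi - lo = 0 := by omega
    simp [pvSolve, h0, pvALoop]
  | succ fuel ih =>
    intro lo hi m hn hlen
    by_cases h0 : hi - lo = 0
    · simp [pvSolve, h0, pvALoop]
    · by_cases h1 : hi - lo = 1
      · have hlo : lo < seq.length := by omega
        have hseg : (seq.drop lo).take (hi - lo) = [seq.getD lo 0] := by
          rw [h1, List.drop_eq_getElem_cons hlo]
          simp only [List.take_succ_cons, List.take_zero, List.getD_eq_getElem?_getD,
            List.getElem?_eq_getElem hlo, Option.getD_some]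
        rw [pvSolve, if_neg h0, if_pos h1, hseg]
        simp only [pvALoop]
        split_ifs <;> rfl
      · rw [pvSolve, if_neg h0, if_neg h1]
        have e1 := ih lo ((lo + hi) / 2) m (by omega) (by omega)
        have e2 := ih ((lo + hi) / 2) hi
          ((pvALoop ((seq.drop lo).take ((lo + hi) / 2 - lo)) (m, 0)).1) (by omega) hlen
        have hseg : (seq.drop lo).take (hi - lo) =
            (seq.drop lo).take ((lo + hi) / 2 - lo) ++
            (seq.drop ((lo + hi) / 2)).take (hi - (lo + hi) / 2) := by
          have hdd : seq.drop ((lo + hi) / 2) = (seq.drop lo).drop ((lo + hi) / 2 - lo) := by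
            rw [List.drop_drop]; congr 1; omega
          rw [hdd, ← List.take_add]
          congr 1; omega
        simp only [e1, e2]
        rw [hseg, pvALoop_append,
          pvALoop_shift ((seq.drop ((lo + hi) / 2)).take (hi - (lo + hi) / 2))
            (pvALoop ((seq.drop lo).take ((lo + hi) / 2 - lo)) (m, 0))]

-- ===== VERDICT (by name: the statement is the Claim_ definition above) =====
theorem count_reordering_py_spec : Claim_equal_count_reordering_py := by
  intro xs _
  unfold Spec_count_reordering_py count_reordering_py count_reordering_py_alt
  rw [pvSolve_spec xs xs.length 0 xs.length (-1) (by omega) (le_refl _)]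
  simp
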